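-- pv_equiv track=rewrite | github.com/iwabuchi404/duckflow | companion/tools/sub_llm_tools.py | _is_file_references
-- ===== SOURCE A (Python) =====
-- def _is_file_references(text: str) -> bool:
--     """
--     Check if the given text contains file references (filename or filename:start-end format).
--
--     A file reference is identified by:
--     - Contains a filename with extension (e.g., .py, .js, .md)
--     - May include line range (e.g., file.py:10-50 or file.py:10)
--
--     Returns:
--         True if text appears to contain file references, False otherwise.
--     """
--     # Common code file extensions
--     code_extensions = {'.py', '.js', '.ts', '.jsx', '.tsx', '.java', '.go', '.rs',
--                     '.rb', '.php', '.c', '.cpp', '.h', '.hpp', '.cs',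
--                     '.swift', '.kt', '.dart', '.lua', '.sh', '.bash',
--                     '.yml', '.yaml', '.json', '.xml', '.html', '.css',
--                     '.md', '.txt', '.sql', '.pl', '.r', '.m'}
--
--     lines = text.strip().split('\n')
--     for line in lines:
--         line = line.strip()
--         if not line:
--             continue
--
--         # Check if line contains a file extension (heuristic for file references)
--         for ext in code_extensions:
--             if ext in line:
--                 # Additional check: if it looks like a file path (contains / or . or ends with ext)
--                 if '/' in line or '.' in line or line.endswith(ext):
--                     return True
--
--     return False
-- ===== SOURCE B (Python) =====
-- def _is_file_references(text: str) -> bool: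
--     """Split on '.' once and hash-look-up the 1-5 chars after each dot."""
--     suf1 = {'c', 'h', 'r', 'm'}
--     suf2 = {'py', 'js', 'ts', 'go', 'rs', 'rb', 'cs', 'kt', 'sh', 'md', 'pl'}
--     suf3 = {'jsx', 'tsx', 'cpp', 'hpp', 'php', 'lua', 'yml', 'xml', 'css', 'txt', 'sql'}
--     suf4 = {'java', 'dart', 'bash', 'yaml', 'json', 'html'}
--     suf5 = {'swift'}
--     for part in text.split('.')[1:]:
--         if (part[:1] in suf1 or part[:2] in suf2 or part[:3] in suf3
--                 or part[:4] in suf4 or part[:5] in suf5):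
--             return True
--     return False
-- ===== Notes on version B (the rewrite author's own statement) =====
-- stated objective: faster
-- what changed: A loops over stripped lines and, for each of 33 extensions, scans the line for the substring (plus an always-true dot guard); B splits the text at dots once and, per dot, looks the following 1-5 characters up in five hash sets, so the per-extension substring scans disappear.
import Mathlib
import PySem

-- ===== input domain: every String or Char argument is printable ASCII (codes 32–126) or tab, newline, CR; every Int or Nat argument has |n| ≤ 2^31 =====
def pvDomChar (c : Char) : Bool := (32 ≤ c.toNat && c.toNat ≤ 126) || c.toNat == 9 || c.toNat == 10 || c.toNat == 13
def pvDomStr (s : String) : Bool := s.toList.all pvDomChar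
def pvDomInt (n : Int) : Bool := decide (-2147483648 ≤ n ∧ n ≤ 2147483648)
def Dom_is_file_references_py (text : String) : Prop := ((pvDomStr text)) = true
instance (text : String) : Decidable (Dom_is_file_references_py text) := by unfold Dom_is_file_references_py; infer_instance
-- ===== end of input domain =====

-- B replaces A's line-by-line loop with per-extension substring scans by one split of the
-- text on '.' plus hash-set lookups of the 1-5 characters after each dot (objective: faster).

-- ===== PORT A =====
def pvExts : List String :=
  [".py", ".js", ".ts", ".jsx", ".tsx", ".java", ".go", ".rs",
   ".rb", ".php", ".c", ".cpp", ".h", ".hpp", ".cs",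
   ".swift", ".kt", ".dart", ".lua", ".sh", ".bash",
   ".yml", ".yaml", ".json", ".xml", ".html", ".css",
   ".md", ".txt", ".sql", ".pl", ".r", ".m"]


def is_file_references_py (text : String) : Bool :=
  match PySem.Str.split? (PySem.Str.strip text) "\n" with
  | none => false
  | some lines =>
    lines.any (fun line0 =>
      let line := PySem.Str.strip line0
      if line = "" then false
      else (PySem.Set.ofList pvExts).any (fun ext =>
        PySem.Str.isIn ext line &&
        (PySem.Str.isIn "/" line || PySem.Str.isIn "." line || PySem.Str.endswith line ext)))

-- ===== PORT B =====
def pvSuf1 : PySem.Set String := PySem.Set.ofList ["c", "h", "r", "m"]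
def pvSuf2 : PySem.Set String := PySem.Set.ofList ["py", "js", "ts", "go", "rs", "rb", "cs", "kt", "sh", "md", "pl"]
def pvSuf3 : PySem.Set String := PySem.Set.ofList ["jsx", "tsx", "cpp", "hpp", "php", "lua", "yml", "xml", "css", "txt", "sql"]
def pvSuf4 : PySem.Set String := PySem.Set.ofList ["java", "dart", "bash", "yaml", "json", "html"]
def pvSuf5 : PySem.Set String := PySem.Set.ofList ["swift"]

def pvChk (part : String) : Bool :=
  PySem.Set.contains pvSuf1 (PySem.Str.slice part none (some 1)) ||
  PySem.Set.contains pvSuf2 (PySem.Str.slice part none (some 2)) ||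
  PySem.Set.contains pvSuf3 (PySem.Str.slice part none (some 3)) ||
  PySem.Set.contains pvSuf4 (PySem.Str.slice part none (some 4)) ||
  PySem.Set.contains pvSuf5 (PySem.Str.slice part none (some 5))
def is_file_references_py_alt (text : String) : Bool :=
  match PySem.Str.split? text "." with
  | none => false
  | some parts => (parts.drop 1).any pvChk

-- ===== PRECONDITION & SPEC =====
def Spec_is_file_references_py (text : String) (out : Bool) : Prop := out = is_file_references_py_alt text
instance (text : String) (out : Bool) : Decidable (Spec_is_file_references_py text out) := by unfold Spec_is_file_references_py; infer_instance

-- ===== CLAIM (what is proved, stated in full; the proofs are below) =====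
def Claim_equal_is_file_references_py : Prop := ∀ (text : String), Dom_is_file_references_py text → Spec_is_file_references_py text (is_file_references_py text)

-- ===== LEMMAS AND PROOFS =====

def mySplit (d : Char) : List Char → List (List Char)
  | [] => [[]]
  | c :: l =>
    if c = d then [] :: mySplit d l
    else
      match mySplit d l with
      | [] => [[c]]
      | h :: t => (c :: h) :: t

lemma mySplit_ne_nil (d : Char) (l : List Char) : mySplit d l ≠ [] := by
  cases l with
  | nil => simp [mySplit]
  | cons c l =>
    simp only [mySplit]
    split_ifs
    · simp
    · rcases h : mySplit d l with _ | ⟨h0, t0⟩ <;> simp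

lemma splitOn_go_eq (d : Char) : ∀ (l : List Char) (fuel : Nat) (cur : List Char) (acc : List (List Char)),
    l.length < fuel →
    PySem.Chars.splitOn.go [d] fuel l cur acc =
      acc.reverse ++ ((cur.reverse ++ (mySplit d l).headI) :: (mySplit d l).tail) := by
  intro l
  induction l with
  | nil =>
    intro fuel cur acc hf
    obtain ⟨f, rfl⟩ : ∃ f, fuel = f + 1 := ⟨fuel - 1, by omega⟩
    simp [PySem.Chars.splitOn.go, mySplit]
  | cons c l ih =>
    intro fuel cur acc hf
    obtain ⟨f, rfl⟩ : ∃ f, fuel = f + 1 := ⟨fuel - 1, by omega⟩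
    simp only [List.length_cons] at hf
    rw [PySem.Chars.splitOn.go]
    by_cases hc : c = d
    · subst hc
      have hpre : List.isPrefixOf [c] (c :: l) = true := by simp [List.isPrefixOf]
      rw [if_pos hpre]
      show PySem.Chars.splitOn.go [c] f l [] (cur.reverse :: acc) = _
      rw [ih f [] (cur.reverse :: acc) (by omega)]
      rcases hm : mySplit c l with _ | ⟨h0, t0⟩
      · exact absurd hm (mySplit_ne_nil c l)
      · simp [mySplit, hm]
    · have hpre : List.isPrefixOf [d] (c :: l) = false := by
        simp [List.isPrefixOf]; exact fun h => absurd h.symm hc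
      rw [if_neg (by simp [hpre])]
      rw [ih f (c :: cur) acc (by omega)]
      rcases hm : mySplit d l with _ | ⟨h0, t0⟩
      · exact absurd hm (mySplit_ne_nil d l)
      · simp [mySplit, hm, hc]

lemma splitOn_eq_mySplit (d : Char) (l : List Char) :
    PySem.Chars.splitOn l [d] = mySplit d l := by
  unfold PySem.Chars.splitOn
  rw [splitOn_go_eq d l (l.length + 1) [] [] (by omega)]
  rcases hm : mySplit d l with _ | ⟨h0, t0⟩
  · exact absurd hm (mySplit_ne_nil d l)
  · simp


lemma prefix_head_mySplit (d : Char) : ∀ (l : List Char) (s : List Char), d ∉ s →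
    (s <+: l ↔ s <+: (mySplit d l).headI) := by
  intro l
  induction l with
  | nil => intro s hd; simp [mySplit]
  | cons c l ih =>
    intro s hd
    by_cases hc : c = d
    · subst hc
      simp only [mySplit, List.headI]
      constructor
      · intro h
        rcases List.prefix_cons_iff.mp h with rfl | ⟨t, rfl, _⟩
        · exact List.nil_prefix
        · exact absurd (List.mem_cons_self ..) hd
      · intro h
        have : s = [] := List.prefix_nil.mp h
        subst this; exact List.nil_prefix
    · rcases hm : mySplit d l with _ | ⟨h0, t0⟩
      · exact absurd hm (mySplit_ne_nil d l)
      · simp only [mySplit, if_neg hc, hm, List.headI]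
        constructor
        · intro h
          rcases List.prefix_cons_iff.mp h with rfl | ⟨t, rfl, ht⟩
          · exact List.nil_prefix
          · have hd' : d ∉ t := fun hx => hd (List.mem_cons_of_mem _ hx)
            have := (ih t hd').mp ht
            rw [hm] at this
            exact List.prefix_cons_iff.mpr (Or.inr ⟨t, rfl, this⟩)
        · intro h
          rcases List.prefix_cons_iff.mp h with rfl | ⟨t, rfl, ht⟩
          · exact List.nil_prefix
          · have hd' : d ∉ t := fun hx => hd (List.mem_cons_of_mem _ hx)
            have := (ih t hd').mpr (by rw [hm]; exact ht)
            exact List.prefix_cons_iff.mpr (Or.inr ⟨t, rfl, this⟩)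

lemma infix_mySplit (d : Char) (s : List Char) (hs : s ≠ []) (hd : d ∉ s) :
    ∀ l, (s <:+: l ↔ ∃ p ∈ mySplit d l, s <:+: p) := by
  intro l
  induction l with
  | nil =>
    simp [mySplit]
  | cons c l ih =>
    by_cases hc : c = d
    · subst hc
      simp only [mySplit]
      rw [List.infix_cons_iff]
      have hnp : ¬ s <+: c :: l := by
        intro h
        rcases List.prefix_cons_iff.mp h with rfl | ⟨t, rfl, _⟩
        · exact hs rfl
        · exact hd (List.mem_cons_self ..)
      have hni : ¬ s <:+: ([] : List Char) := fun h => hs (List.infix_nil.mp h)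
      constructor
      · intro h
        rcases h with h | h
        · exact absurd h hnp
        · rcases ih.mp h with ⟨p, hp, hip⟩
          exact ⟨p, List.mem_cons_of_mem _ hp, hip⟩
      · rintro ⟨p, hp, hip⟩
        rcases List.mem_cons.mp hp with rfl | hp
        · exact absurd hip hni
        · exact Or.inr (ih.mpr ⟨p, hp, hip⟩)
    · rcases hm : mySplit d l with _ | ⟨h0, t0⟩
      · exact absurd hm (mySplit_ne_nil d l)
      · simp only [mySplit, if_neg hc, hm]
        rw [hm] at ih
        have hph : s <+: c :: l ↔ s <+: c :: h0 := by
          have := prefix_head_mySplit d (c :: l) s hd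
          rw [show mySplit d (c :: l) = (c :: h0) :: t0 by simp [mySplit, if_neg hc, hm]] at this
          simpa using this
        rw [List.infix_cons_iff]
        constructor
        · intro h
          rcases h with h | h
          · exact ⟨c :: h0, by simp, List.IsPrefix.isInfix (hph.mp h)⟩
          · rcases ih.mp h with ⟨p, hp, hip⟩
            rcases List.mem_cons.mp hp with rfl | hp
            · exact ⟨c :: p, by simp, hip.trans (List.suffix_cons c p).isInfix⟩
            · exact ⟨p, by simp [hp], hip⟩
        · rintro ⟨p, hp, hip⟩
          rcases List.mem_cons.mp hp with rfl | hp
          · rcases List.infix_cons_iff.mp hip with h | h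
            · exact Or.inl (hph.mpr h)
            · exact Or.inr (ih.mpr ⟨h0, by simp, h⟩)
          · exact Or.inr (ih.mpr ⟨p, by simp [hp], hip⟩)

lemma infix_cons_mySplit (d : Char) (s : List Char) (hd : d ∉ s) :
    ∀ l, ((d :: s) <:+: l ↔ ∃ p ∈ (mySplit d l).tail, s <+: p) := by
  intro l
  induction l with
  | nil =>
    simp [mySplit]
  | cons c l ih =>
    by_cases hc : c = d
    · subst hc
      rcases hm : mySplit c l with _ | ⟨h0, t0⟩
      · exact absurd hm (mySplit_ne_nil c l)
      · simp only [mySplit, hm]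
        rw [List.infix_cons_iff]
        rw [hm] at ih
        have hph : s <+: l ↔ s <+: h0 := by
          have := prefix_head_mySplit c l s hd
          rw [hm] at this; simpa using this
        constructor
        · intro h
          rcases h with h | h
          · rcases List.prefix_cons_iff.mp h with h' | ⟨t, ht, hpt⟩
            · exact absurd h' (by simp)
            · have : s <+: l := by
                have : t <+: l := hpt
                cases ht; exact this
              exact ⟨h0, by simp, hph.mp this⟩
          · rcases ih.mp h with ⟨p, hp, hpp⟩
            exact ⟨p, List.mem_cons_of_mem _ hp, hpp⟩
        · rintro ⟨p, hp, hpp⟩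
          rcases List.mem_cons.mp hp with rfl | hp
          · exact Or.inl (List.prefix_cons_iff.mpr (Or.inr ⟨s, rfl, hph.mpr hpp⟩))
          · exact Or.inr (ih.mpr ⟨p, hp, hpp⟩)
    · rcases hm : mySplit d l with _ | ⟨h0, t0⟩
      · exact absurd hm (mySplit_ne_nil d l)
      · simp only [mySplit, if_neg hc, hm, List.tail_cons]
        rw [hm] at ih
        rw [List.infix_cons_iff]
        have hnp : ¬ (d :: s) <+: c :: l := by
          intro h
          rcases List.prefix_cons_iff.mp h with h' | ⟨t, ht, _⟩
          · exact absurd h' (by simp)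
          · exact hc (by injection ht with h1 _; exact h1.symm) |>.elim
        constructor
        · intro h
          rcases h with h | h
          · exact absurd h hnp
          · simpa using ih.mp h
        · intro h
          exact Or.inr (ih.mpr (by simpa using h))

lemma infix_dropWhile_of (p : Char → Bool) (s : List Char) (hs : s ≠ [])
    (hall : ∀ c ∈ s, p c = false) : ∀ l, s <:+: l → s <:+: List.dropWhile p l := by
  intro l
  induction l with
  | nil => intro h; exact absurd (List.infix_nil.mp h) hs
  | cons c l ih =>
    intro h
    by_cases hpc : p c = true
    · rw [List.dropWhile_cons_of_pos hpc]
      rcases List.infix_cons_iff.mp h with h' | h'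
      · rcases List.prefix_cons_iff.mp h' with rfl | ⟨t, rfl, _⟩
        · exact absurd rfl hs
        · exact absurd (hall c (List.mem_cons_self ..)) (by simp [hpc])
      · exact ih h'
    · rw [List.dropWhile_cons_of_neg hpc]
      exact h

lemma strip_infix (l : List Char) : PySem.Chars.strip l <:+: l := by
  have h1 : PySem.Chars.lstrip l <:+ l := List.dropWhile_suffix _
  have h2 : PySem.Chars.strip l <+: PySem.Chars.lstrip l := by
    unfold PySem.Chars.strip PySem.Chars.rstrip
    have hx : List.dropWhile PySem.Chars.isspace (PySem.Chars.lstrip l).reverse <:+ (PySem.Chars.lstrip l).reverse :=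
      List.dropWhile_suffix _
    have := List.reverse_prefix.mpr hx
    simpa using this
  exact h2.isInfix.trans h1.isInfix

lemma infix_strip_iff (s l : List Char) (hs : s ≠ [])
    (hall : ∀ c ∈ s, PySem.Chars.isspace c = false) :
    (s <:+: PySem.Chars.strip l ↔ s <:+: l) := by
  constructor
  · intro h; exact h.trans (strip_infix l)
  · intro h
    unfold PySem.Chars.strip PySem.Chars.rstrip PySem.Chars.lstrip
    have h1 : s <:+: List.dropWhile PySem.Chars.isspace l :=
      infix_dropWhile_of _ s hs hall l h
    have h2 : s.reverse <:+: (List.dropWhile PySem.Chars.isspace l).reverse :=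
      List.reverse_infix.mpr h1
    have h3 := infix_dropWhile_of PySem.Chars.isspace s.reverse (by simpa using hs)
      (fun c hc => hall c (List.mem_reverse.mp hc)) _ h2
    rw [← List.reverse_infix]
    simpa using h3


lemma pvExts_nonempty : ∀ e ∈ pvExts, e.toList ≠ [] := by decide
lemma pvExts_no_ws : ∀ e ∈ pvExts, ∀ c ∈ e.toList, PySem.Chars.isspace c = false := by
  have h : (pvExts.all (fun e => e.toList.all (fun c => !PySem.Chars.isspace c))) = true := by rfl
  intro e he c hc
  simpa using List.all_eq_true.mp (List.all_eq_true.mp h e he) c hc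
lemma pvExts_dot : ∀ e ∈ pvExts, ('.' : Char) ∈ e.toList := by decide

-- the inner extension test on a (stripped, nonempty) line is exactly "ext occurs in the line"
lemma inner_iff (l : String) (e : String) (he : e ∈ pvExts) :
    (PySem.Str.isIn e l &&
      (PySem.Str.isIn "/" l || PySem.Str.isIn "." l || PySem.Str.endswith l e)) = true ↔
    e.toList <:+: l.toList := by
  constructor
  · intro h
    simp only [Bool.and_eq_true] at h
    exact (PySem.Chars.isIn_iff_infix e.toList l.toList).mp (by
      have := h.1
      simpa [PySem.Str.isIn] using this)
  · intro h
    have h1 : PySem.Chars.isIn e.toList l.toList = true :=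
      (PySem.Chars.isIn_iff_infix e.toList l.toList).mpr h
    have hdot : ['.'] <:+: l.toList :=
      ((List.singleton_infix_iff '.' e.toList).mpr (pvExts_dot e he)).trans h
    have h2 : PySem.Chars.isIn ['.'] l.toList = true :=
      (PySem.Chars.isIn_iff_infix ['.'] l.toList).mpr hdot
    simp [PySem.Str.isIn, h1]
    refine Or.inl (Or.inr ?_)
    simpa using h2

lemma line_char (line : String) :
    ((fun line0 =>
      let l := PySem.Str.strip line0
      if l = "" then false
      else (PySem.Set.ofList pvExts).any (fun ext =>
        PySem.Str.isIn ext l &&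
        (PySem.Str.isIn "/" l || PySem.Str.isIn "." l || PySem.Str.endswith l ext))) line) = true ↔
    ∃ e ∈ pvExts, e.toList <:+: line.toList := by
  simp only []
  by_cases hemp : PySem.Str.strip line = ""
  · rw [if_pos hemp]
    simp only [Bool.false_eq_true, false_iff]
    rintro ⟨e, he, hinf⟩
    have hthis := (infix_strip_iff e.toList line.toList (pvExts_nonempty e he) (pvExts_no_ws e he)).mpr hinf
    have hemp' := congrArg String.toList hemp
    simp [PySem.Str.strip, String.toList_ofList] at hemp'
    rw [hemp'] at hthis
    exact (pvExts_nonempty e he) (List.infix_nil.mp hthis)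
  · rw [if_neg hemp]
    rw [List.any_eq_true]
    constructor
    · rintro ⟨e, he, hcond⟩
      have he' : e ∈ pvExts := (PySem.Set.mem_ofList pvExts e).mp he
      have := (inner_iff _ e he').mp hcond
      rw [show (PySem.Str.strip line).toList = PySem.Chars.strip line.toList from by
        simp [PySem.Str.strip, String.toList_ofList]] at this
      exact ⟨e, he', (infix_strip_iff e.toList line.toList (pvExts_nonempty e he') (pvExts_no_ws e he')).mp this⟩
    · rintro ⟨e, he, hinf⟩
      refine ⟨e, (PySem.Set.mem_ofList pvExts e).mpr he, (inner_iff _ e he).mpr ?_⟩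
      rw [show (PySem.Str.strip line).toList = PySem.Chars.strip line.toList from by
        simp [PySem.Str.strip, String.toList_ofList]]
      exact (infix_strip_iff e.toList line.toList (pvExts_nonempty e he) (pvExts_no_ws e he)).mpr hinf

lemma pvExts_no_nl : ∀ e ∈ pvExts, ('\n' : Char) ∉ e.toList := by
  intro e he hmem
  have := pvExts_no_ws e he '\n' hmem
  simp [show PySem.Chars.isspace '\n' = true from by decide] at this

lemma strip_toList (s : String) : (PySem.Str.strip s).toList = PySem.Chars.strip s.toList := by
  simp [PySem.Str.strip, String.toList_ofList]

lemma A_char (text : String) :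
    is_file_references_py text = true ↔ ∃ e ∈ pvExts, e.toList <:+: text.toList := by
  unfold is_file_references_py
  rw [PySem.Str.split?]
  rw [show ("\n" : String).toList = ['\n'] from rfl]
  rw [PySem.Chars.split?]
  simp only [List.isEmpty_cons, Bool.false_eq_true, if_false, Option.map_some]
  rw [splitOn_eq_mySplit]
  rw [strip_toList text]
  rw [List.any_map, List.any_eq_true]
  have step1 : ∀ p, ((fun line0 =>
      let l := PySem.Str.strip line0
      if l = "" then false
      else (PySem.Set.ofList pvExts).any (fun ext =>
        PySem.Str.isIn ext l &&
        (PySem.Str.isIn "/" l || PySem.Str.isIn "." l || PySem.Str.endswith l ext))) ∘ String.ofList) p = true ↔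
      ∃ e ∈ pvExts, e.toList <:+: p := by
    intro p
    rw [Function.comp_apply, line_char (String.ofList p), String.toList_ofList]
  constructor
  · rintro ⟨p, hp, hf⟩
    rcases (step1 p).mp hf with ⟨e, he, hinf⟩
    have h1 : e.toList <:+: PySem.Chars.strip text.toList :=
      (infix_mySplit '\n' e.toList (pvExts_nonempty e he) (pvExts_no_nl e he)
        (PySem.Chars.strip text.toList)).mpr ⟨p, hp, hinf⟩
    exact ⟨e, he, (infix_strip_iff e.toList text.toList (pvExts_nonempty e he) (pvExts_no_ws e he)).mp h1⟩
  · rintro ⟨e, he, hinf⟩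
    have h1 : e.toList <:+: PySem.Chars.strip text.toList :=
      (infix_strip_iff e.toList text.toList (pvExts_nonempty e he) (pvExts_no_ws e he)).mpr hinf
    rcases (infix_mySplit '\n' e.toList (pvExts_nonempty e he) (pvExts_no_nl e he)
        (PySem.Chars.strip text.toList)).mp h1 with ⟨p, hp, hip⟩
    exact ⟨p, hp, (step1 p).mpr ⟨e, he, hip⟩⟩


lemma cont_slice_iff (L : List String) (part : String) (n : Int) (hn : 0 ≤ n) :
    PySem.Set.contains (PySem.Set.ofList L) (PySem.Str.slice part none (some n)) = true ↔
    ∃ w ∈ L, part.toList.take n.toNat = w.toList := by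
  rw [PySem.Set.contains_iff, PySem.Set.mem_ofList]
  have hsl : (PySem.Str.slice part none (some n)).toList = part.toList.take n.toNat := by
    rw [PySem.Str.toList_slice, PySem.Chars.slice_eq_listSlice, PySem.List.slice_to part.toList hn]
  constructor
  · intro h
    exact ⟨_, h, by rw [← hsl]⟩
  · rintro ⟨w, hw, hEq⟩
    have hx : PySem.Str.slice part none (some n) = w := String.toList_inj.mp (by rw [hsl, hEq])
    rwa [hx]

lemma chk_iff (part : String) :
    pvChk part = true ↔ ∃ e ∈ pvExts, e.toList.drop 1 <+: part.toList := by
  unfold pvChk pvSuf1 pvSuf2 pvSuf3 pvSuf4 pvSuf5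
  simp only [Bool.or_eq_true]
  rw [cont_slice_iff _ part 1 (by norm_num), cont_slice_iff _ part 2 (by norm_num),
      cont_slice_iff _ part 3 (by norm_num), cont_slice_iff _ part 4 (by norm_num),
      cont_slice_iff _ part 5 (by norm_num)]
  constructor
  · intro h
    rcases h with ((((hcl | hcl) | hcl) | hcl) | hcl)
    · obtain ⟨w, hw, hEq⟩ := hcl
      simp only [List.mem_cons, List.not_mem_nil, or_false] at hw
      rcases hw with rfl|rfl|rfl|rfl
      · exact ⟨".c", by decide, List.prefix_iff_eq_take.mpr hEq.symm⟩
      · exact ⟨".h", by decide, List.prefix_iff_eq_take.mpr hEq.symm⟩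
      · exact ⟨".r", by decide, List.prefix_iff_eq_take.mpr hEq.symm⟩
      · exact ⟨".m", by decide, List.prefix_iff_eq_take.mpr hEq.symm⟩
    · obtain ⟨w, hw, hEq⟩ := hcl
      simp only [List.mem_cons, List.not_mem_nil, or_false] at hw
      rcases hw with rfl|rfl|rfl|rfl|rfl|rfl|rfl|rfl|rfl|rfl|rfl
      · exact ⟨".py", by decide, List.prefix_iff_eq_take.mpr hEq.symm⟩
      · exact ⟨".js", by decide, List.prefix_iff_eq_take.mpr hEq.symm⟩
      · exact ⟨".ts", by decide, List.prefix_iff_eq_take.mpr hEq.symm⟩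
      · exact ⟨".go", by decide, List.prefix_iff_eq_take.mpr hEq.symm⟩
      · exact ⟨".rs", by decide, List.prefix_iff_eq_take.mpr hEq.symm⟩
      · exact ⟨".rb", by decide, List.prefix_iff_eq_take.mpr hEq.symm⟩
      · exact ⟨".cs", by decide, List.prefix_iff_eq_take.mpr hEq.symm⟩
      · exact ⟨".kt", by decide, List.prefix_iff_eq_take.mpr hEq.symm⟩
      · exact ⟨".sh", by decide, List.prefix_iff_eq_take.mpr hEq.symm⟩
      · exact ⟨".md", by decide, List.prefix_iff_eq_take.mpr hEq.symm⟩
      · exact ⟨".pl", by decide, List.prefix_iff_eq_take.mpr hEq.symm⟩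
    · obtain ⟨w, hw, hEq⟩ := hcl
      simp only [List.mem_cons, List.not_mem_nil, or_false] at hw
      rcases hw with rfl|rfl|rfl|rfl|rfl|rfl|rfl|rfl|rfl|rfl|rfl
      · exact ⟨".jsx", by decide, List.prefix_iff_eq_take.mpr hEq.symm⟩
      · exact ⟨".tsx", by decide, List.prefix_iff_eq_take.mpr hEq.symm⟩
      · exact ⟨".cpp", by decide, List.prefix_iff_eq_take.mpr hEq.symm⟩
      · exact ⟨".hpp", by decide, List.prefix_iff_eq_take.mpr hEq.symm⟩
      · exact ⟨".php", by decide, List.prefix_iff_eq_take.mpr hEq.symm⟩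
      · exact ⟨".lua", by decide, List.prefix_iff_eq_take.mpr hEq.symm⟩
      · exact ⟨".yml", by decide, List.prefix_iff_eq_take.mpr hEq.symm⟩
      · exact ⟨".xml", by decide, List.prefix_iff_eq_take.mpr hEq.symm⟩
      · exact ⟨".css", by decide, List.prefix_iff_eq_take.mpr hEq.symm⟩
      · exact ⟨".txt", by decide, List.prefix_iff_eq_take.mpr hEq.symm⟩
      · exact ⟨".sql", by decide, List.prefix_iff_eq_take.mpr hEq.symm⟩
    · obtain ⟨w, hw, hEq⟩ := hcl
      simp only [List.mem_cons, List.not_mem_nil, or_false] at hw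
      rcases hw with rfl|rfl|rfl|rfl|rfl|rfl
      · exact ⟨".java", by decide, List.prefix_iff_eq_take.mpr hEq.symm⟩
      · exact ⟨".dart", by decide, List.prefix_iff_eq_take.mpr hEq.symm⟩
      · exact ⟨".bash", by decide, List.prefix_iff_eq_take.mpr hEq.symm⟩
      · exact ⟨".yaml", by decide, List.prefix_iff_eq_take.mpr hEq.symm⟩
      · exact ⟨".json", by decide, List.prefix_iff_eq_take.mpr hEq.symm⟩
      · exact ⟨".html", by decide, List.prefix_iff_eq_take.mpr hEq.symm⟩
    · obtain ⟨w, hw, hEq⟩ := hcl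
      simp only [List.mem_cons, List.not_mem_nil, or_false] at hw
      rcases hw with rfl
      · exact ⟨".swift", by decide, List.prefix_iff_eq_take.mpr hEq.symm⟩
  · rintro ⟨e, he, hp⟩
    have hEq := List.prefix_iff_eq_take.mp hp
    fin_cases he
    · exact Or.inl (Or.inl (Or.inl (Or.inr (⟨"py", by decide, hEq.symm⟩))))
    · exact Or.inl (Or.inl (Or.inl (Or.inr (⟨"js", by decide, hEq.symm⟩))))
    · exact Or.inl (Or.inl (Or.inl (Or.inr (⟨"ts", by decide, hEq.symm⟩))))
    · exact Or.inl (Or.inl (Or.inr (⟨"jsx", by decide, hEq.symm⟩)))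
    · exact Or.inl (Or.inl (Or.inr (⟨"tsx", by decide, hEq.symm⟩)))
    · exact Or.inl (Or.inr (⟨"java", by decide, hEq.symm⟩))
    · exact Or.inl (Or.inl (Or.inl (Or.inr (⟨"go", by decide, hEq.symm⟩))))
    · exact Or.inl (Or.inl (Or.inl (Or.inr (⟨"rs", by decide, hEq.symm⟩))))
    · exact Or.inl (Or.inl (Or.inl (Or.inr (⟨"rb", by decide, hEq.symm⟩))))
    · exact Or.inl (Or.inl (Or.inr (⟨"php", by decide, hEq.symm⟩)))
    · exact Or.inl (Or.inl (Or.inl (Or.inl (⟨"c", by decide, hEq.symm⟩))))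
    · exact Or.inl (Or.inl (Or.inr (⟨"cpp", by decide, hEq.symm⟩)))
    · exact Or.inl (Or.inl (Or.inl (Or.inl (⟨"h", by decide, hEq.symm⟩))))
    · exact Or.inl (Or.inl (Or.inr (⟨"hpp", by decide, hEq.symm⟩)))
    · exact Or.inl (Or.inl (Or.inl (Or.inr (⟨"cs", by decide, hEq.symm⟩))))
    · exact Or.inr (⟨"swift", by decide, hEq.symm⟩)
    · exact Or.inl (Or.inl (Or.inl (Or.inr (⟨"kt", by decide, hEq.symm⟩))))
    · exact Or.inl (Or.inr (⟨"dart", by decide, hEq.symm⟩))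
    · exact Or.inl (Or.inl (Or.inr (⟨"lua", by decide, hEq.symm⟩)))
    · exact Or.inl (Or.inl (Or.inl (Or.inr (⟨"sh", by decide, hEq.symm⟩))))
    · exact Or.inl (Or.inr (⟨"bash", by decide, hEq.symm⟩))
    · exact Or.inl (Or.inl (Or.inr (⟨"yml", by decide, hEq.symm⟩)))
    · exact Or.inl (Or.inr (⟨"yaml", by decide, hEq.symm⟩))
    · exact Or.inl (Or.inr (⟨"json", by decide, hEq.symm⟩))
    · exact Or.inl (Or.inl (Or.inr (⟨"xml", by decide, hEq.symm⟩)))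
    · exact Or.inl (Or.inr (⟨"html", by decide, hEq.symm⟩))
    · exact Or.inl (Or.inl (Or.inr (⟨"css", by decide, hEq.symm⟩)))
    · exact Or.inl (Or.inl (Or.inl (Or.inr (⟨"md", by decide, hEq.symm⟩))))
    · exact Or.inl (Or.inl (Or.inr (⟨"txt", by decide, hEq.symm⟩)))
    · exact Or.inl (Or.inl (Or.inr (⟨"sql", by decide, hEq.symm⟩)))
    · exact Or.inl (Or.inl (Or.inl (Or.inr (⟨"pl", by decide, hEq.symm⟩))))
    · exact Or.inl (Or.inl (Or.inl (Or.inl (⟨"r", by decide, hEq.symm⟩))))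
    · exact Or.inl (Or.inl (Or.inl (Or.inl (⟨"m", by decide, hEq.symm⟩))))


lemma pvExts_tail_no_dot : ∀ e ∈ pvExts, ('.' : Char) ∉ e.toList.drop 1 := by decide
lemma pvExts_cons : ∀ e ∈ pvExts, ('.' : Char) :: e.toList.drop 1 = e.toList := by decide

lemma B_char (text : String) :
    is_file_references_py_alt text = true ↔ ∃ e ∈ pvExts, e.toList <:+: text.toList := by
  unfold is_file_references_py_alt
  rw [PySem.Str.split?]
  rw [show ("." : String).toList = ['.'] from rfl]
  rw [PySem.Chars.split?]
  simp only [List.isEmpty_cons, Bool.false_eq_true, if_false, Option.map_some]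
  rw [splitOn_eq_mySplit]
  rw [← List.map_drop, List.any_map, List.any_eq_true]
  rw [List.drop_one]
  constructor
  · rintro ⟨p, hp, hc⟩
    have := (chk_iff (String.ofList p)).mp hc
    rw [String.toList_ofList] at this
    rcases this with ⟨e, he, hpre⟩
    refine ⟨e, he, ?_⟩
    rw [← pvExts_cons e he]
    exact (infix_cons_mySplit '.' (e.toList.drop 1) (pvExts_tail_no_dot e he) text.toList).mpr ⟨p, hp, hpre⟩
  · rintro ⟨e, he, hinf⟩
    rw [← pvExts_cons e he] at hinf
    rcases (infix_cons_mySplit '.' (e.toList.drop 1) (pvExts_tail_no_dot e he) text.toList).mp hinf with ⟨p, hp, hpre⟩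
    refine ⟨p, hp, (chk_iff (String.ofList p)).mpr ?_⟩
    rw [String.toList_ofList]
    exact ⟨e, he, hpre⟩

-- ===== VERDICT (by name: the statement is the Claim_ definition above) =====
theorem is_file_references_py_spec : Claim_equal_is_file_references_py := by
  intro text _
  unfold Spec_is_file_references_py
  rcases hb : is_file_references_py_alt text with _ | _
  · rcases ha : is_file_references_py text with _ | _
    · rfl
    · exact absurd ((B_char text).mpr ((A_char text).mp ha)) (by simp [hb])
  · exact (A_char text).mpr ((B_char text).mp hb)
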